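-- pv_equiv track=rewrite | github.com/Mnogoznall2405/HUB-IT | WEB-itinvent/backend/appdb/sql_compat.py | _bind_qmark_params
-- ===== SOURCE A (Python) =====
-- from typing import Any
--
-- def _bind_qmark_params(sql: str, params: tuple[Any, ...] | list[Any]):
--     values = list(params)
--     bound_params: dict[str, Any] = {}
--     parts: list[str] = []
--     param_index = 0
--     for char in sql:
--         if char == "?":
--             key = f"p{param_index}"
--             parts.append(f":{key}")
--             bound_params[key] = values[param_index]
--             param_index += 1
--         else:
--             parts.append(char)
--     return "".join(parts), bound_params
-- ===== SOURCE B (Python) =====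
-- def _bind_qmark_params(sql, params):
--     values = list(params)
--     segments = sql.split("?")
--     bound_params = {f"p{i}": values[i] for i in range(len(segments) - 1)}
--     rebuilt = segments[0] + "".join(
--         f":p{i}{tail}" for i, tail in enumerate(segments[1:])
--     )
--     return rebuilt, bound_params
-- ===== Notes on version B (the rewrite author's own statement) =====
-- stated objective: simpler
-- what changed: Instead of a per-character loop with a branch and a running parts list, B splits the SQL once on '?', builds the bound-params dict by a comprehension over the placeholder slots, and reconstructs the SQL by interleaving ':pN' between the split segments (bulk C-level split/join instead of per-character Python steps).
import Mathlib
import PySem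

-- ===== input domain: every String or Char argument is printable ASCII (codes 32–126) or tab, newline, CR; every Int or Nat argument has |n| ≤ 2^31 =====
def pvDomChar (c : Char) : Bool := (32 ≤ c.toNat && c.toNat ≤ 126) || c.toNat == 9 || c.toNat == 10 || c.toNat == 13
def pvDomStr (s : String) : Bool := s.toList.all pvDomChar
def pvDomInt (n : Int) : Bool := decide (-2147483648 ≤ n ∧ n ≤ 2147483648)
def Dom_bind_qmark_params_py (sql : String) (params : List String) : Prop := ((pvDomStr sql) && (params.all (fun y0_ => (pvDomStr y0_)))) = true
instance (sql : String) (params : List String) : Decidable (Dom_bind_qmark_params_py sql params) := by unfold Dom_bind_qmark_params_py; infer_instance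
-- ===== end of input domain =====

-- B rebuilds the query from sql.split('?') with ':pN' interleaved between the segments and a dict
-- comprehension over the placeholder slots, instead of A's per-character loop; same O(n) cost.

-- f"p{i}" (used by both Pythons)
def pvKey (i : Int) : String := String.ofList ('p' :: PySem.Int.toChars i)

-- ===== PORT A =====
-- one step of A's 'for char in sql' loop; state = (parts, bound_params, param_index)
def pvStepA (params : List String)
    (st : List (List Char) × PySem.Dict String String × Int) (c : Char) :
    List (List Char) × PySem.Dict String String × Int :=
  if c = '?' then
    (st.1 ++ [':' :: (pvKey st.2.2).toList],
     st.2.1.insert (pvKey st.2.2) (PySem.List.pyGetD params st.2.2 ""),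
     st.2.2 + 1)
  else
    (st.1 ++ [[c]], st.2.1, st.2.2)

def bind_qmark_params_py (sql : String) (params : List String) : String × (List (String × String)) :=
  let r := sql.toList.foldl (pvStepA params) ([], PySem.Dict.empty, 0)
  (String.ofList (PySem.Chars.join [] r.1), r.2.1.items)

-- ===== PORT B =====
-- one entry of B's dict comprehension: bound_params[f"p{i}"] = values[i]
def pvIns (params : List String) (d : PySem.Dict String String) (i : Int) :
    PySem.Dict String String :=
  d.insert (pvKey i) (PySem.List.pyGetD params i "")

def bind_qmark_params_py_alt (sql : String) (params : List String) : String × (List (String × String)) :=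
  let segments := PySem.Chars.splitOn sql.toList ['?']
  let n : Int := PySem.List.len segments - 1
  let bound := (PySem.List.pyRange 0 n 1).foldl (pvIns params) PySem.Dict.empty
  let rebuilt := segments.headD [] ++
    PySem.Chars.join [] ((PySem.List.enumerate segments.tail).map
      (fun p => ':' :: ((pvKey p.1).toList ++ p.2)))
  (String.ofList rebuilt, bound.items)

-- ===== PRECONDITION & SPEC =====
-- A raises IndexError (values[param_index]) as soon as the '?' placeholders outnumber params;
-- exactly those inputs are excluded (B raises there too).
def Pre_bind_qmark_params_py (sql : String) (params : List String) : Prop :=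
  sql.toList.count '?' ≤ params.length
instance (sql : String) (params : List String) : Decidable (Pre_bind_qmark_params_py sql params) := by unfold Pre_bind_qmark_params_py; infer_instance

def pvWitness_bind_qmark_params_py : String × List String :=
  ("select x from t where a = ? and b = ?", ["1", "two"])

def Spec_bind_qmark_params_py (sql : String) (params : List String) (out : String × (List (String × String))) : Prop := out = bind_qmark_params_py_alt sql params
instance (sql : String) (params : List String) (out : String × (List (String × String))) : Decidable (Spec_bind_qmark_params_py sql params out) := by unfold Spec_bind_qmark_params_py; infer_instance

-- ===== CLAIM (what is proved, stated in full; the proofs are below) =====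
def Claim_equal_bind_qmark_params_py : Prop := ∀ (sql : String) (params : List String), Dom_bind_qmark_params_py sql params → Pre_bind_qmark_params_py sql params → Spec_bind_qmark_params_py sql params (bind_qmark_params_py sql params)

-- ===== LEMMAS AND PROOFS =====

-- clean recursion computing cs.split('?') on char lists
def pvSplit1 : List Char → List (List Char)
  | [] => [[]]
  | c :: r => if c = '?' then [] :: pvSplit1 r else (pvSplit1 r).modifyHead (c :: ·)

theorem pvSplit1_ne_nil (l : List Char) : pvSplit1 l ≠ [] := by
  cases l with
  | nil => simp [pvSplit1]
  | cons c r =>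
    simp only [pvSplit1]
    split_ifs
    · simp
    · have := pvSplit1_ne_nil r
      cases hs : pvSplit1 r with
      | nil => exact absurd hs this
      | cons a t => simp [List.modifyHead]

theorem pvGo_spec (fuel : Nat) : ∀ (l cur : List Char) (acc : List (List Char)), l.length < fuel →
    PySem.Chars.splitOn.go ['?'] fuel l cur acc
      = acc.reverse ++ (pvSplit1 l).modifyHead (cur.reverse ++ ·) := by
  induction fuel with
  | zero => intro l cur acc h; omega
  | succ f ih =>
    intro l cur acc h
    cases l with
    | nil => rw [PySem.Chars.splitOn.go.eq_def]; simp [pvSplit1]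
    | cons c rest =>
      rw [PySem.Chars.splitOn.go.eq_def]
      simp only []
      by_cases hc : c = '?'
      · subst hc
        have hp : List.isPrefixOf ['?'] ('?' :: rest) = true := by simp [List.isPrefixOf]
        rw [if_pos hp]
        simp only [List.length_cons, List.drop_succ_cons, List.length_nil, List.drop_zero]
        rw [ih rest [] ((cur.reverse) :: acc) (by simp at h ⊢; omega)]
        simp only [pvSplit1, List.modifyHead_cons, List.nil_append, List.reverse_cons,
          List.reverse_nil, List.nil_append, List.append_assoc, List.singleton_append]
        cases pvSplit1 rest <;> simp
      · have hp : List.isPrefixOf ['?'] (c :: rest) = false := by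
          simp [List.isPrefixOf]; exact fun h' => hc (by simpa using h'.symm)
        rw [if_neg (by simp [hp])]
        rw [ih rest (c :: cur) acc (by simp at h ⊢; omega)]
        have hne := pvSplit1_ne_nil rest
        cases hs : pvSplit1 rest with
        | nil => exact absurd hs hne
        | cons a t => simp [pvSplit1, hc, hs, List.modifyHead]

theorem pvSplitOn_eq (cs : List Char) : PySem.Chars.splitOn cs ['?'] = pvSplit1 cs := by
  unfold PySem.Chars.splitOn
  rw [pvGo_spec (cs.length + 1) cs [] [] (by omega)]
  cases hs : pvSplit1 cs with
  | nil => exact absurd hs (pvSplit1_ne_nil cs)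
  | cons a t => simp

theorem pvSplit1_length (cs : List Char) : (pvSplit1 cs).length = cs.count '?' + 1 := by
  induction cs with
  | nil => simp [pvSplit1]
  | cons c r ih =>
    by_cases hc : c = '?' <;>
      simp [pvSplit1, hc, List.count_cons, List.length_modifyHead, ih]

theorem pvJoin_eq_flatten (ps : List (List Char)) : PySem.Chars.join [] ps = ps.flatten := by
  simp [PySem.Chars.join]
  induction ps with
  | nil => rfl
  | cons h t ih => cases t <;> simp_all [List.intercalate, List.intersperse]

-- the pieces A appends to `parts` while scanning cs with param_index = k
def pvPartsOf : List Char → Int → List (List Char)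
  | [], _ => []
  | c :: r, k =>
    if c = '?' then (':' :: (pvKey k).toList) :: pvPartsOf r (k + 1)
    else [c] :: pvPartsOf r k

theorem pvFoldA (params : List String) (cs : List Char) :
    ∀ (parts : List (List Char)) (d : PySem.Dict String String) (k : Int),
    cs.foldl (pvStepA params) (parts, d, k)
      = (parts ++ pvPartsOf cs k,
         (PySem.List.pyRange k (k + (cs.count '?' : Int)) 1).foldl (pvIns params) d,
         k + (cs.count '?' : Int)) := by
  induction cs with
  | nil =>
    intro parts d k
    simp [pvPartsOf, PySem.List.pyRange_one_eq_nil (le_refl k)]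
  | cons c r ih =>
    intro parts d k
    by_cases hc : c = '?'
    · subst hc
      have hcnt : (('?' :: r).count '?' : Int) = (r.count '?' : Int) + 1 := by
        simp [List.count_cons]
      rw [List.foldl_cons]
      have hstep : pvStepA params (parts, d, k) '?'
          = (parts ++ [':' :: (pvKey k).toList],
             d.insert (pvKey k) (PySem.List.pyGetD params k ""), k + 1) := by
        simp [pvStepA]
      rw [hstep, ih]
      have hrange : PySem.List.pyRange k (k + (('?' :: r).count '?' : Int)) 1
          = k :: PySem.List.pyRange (k + 1) ((k + 1) + (r.count '?' : Int)) 1 := by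
        rw [hcnt]
        rw [PySem.List.pyRange_one_cons (by omega)]
        ring_nf
      rw [hrange]
      simp only [List.foldl_cons]
      refine Prod.ext ?_ (Prod.ext ?_ ?_)
      · simp [pvPartsOf]
      · rfl
      · simp only []
        omega
    · rw [List.foldl_cons]
      have hstep : pvStepA params (parts, d, k) c = (parts ++ [[c]], d, k) := by
        simp [pvStepA, hc]
      rw [hstep, ih]
      have hcnt : ((c :: r).count '?' : Int) = (r.count '?' : Int) := by
        simp [List.count_cons, hc]
      rw [hcnt]
      simp [pvPartsOf, hc]

theorem pvB_str (cs : List Char) : ∀ (k : Int),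
    (pvSplit1 cs).headD [] ++
      ((PySem.List.enumerate (pvSplit1 cs).tail k).map
        (fun p => ':' :: ((pvKey p.1).toList ++ p.2))).flatten
      = (pvPartsOf cs k).flatten := by
  induction cs with
  | nil => intro k; simp [pvSplit1, pvPartsOf, PySem.List.enumerate]
  | cons c r ih =>
    intro k
    by_cases hc : c = '?'
    · subst hc
      have hne := pvSplit1_ne_nil r
      cases hs : pvSplit1 r with
      | nil => exact absurd hs hne
      | cons h t =>
        have ihr := ih (k + 1)
        rw [hs] at ihr
        simp only [List.headD_cons, List.tail_cons] at ihr
        simp only [pvSplit1, if_pos rfl, hs, if_true, List.headD_cons, List.tail_cons,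
          PySem.List.enumerate_cons, List.map_cons, List.flatten_cons, pvPartsOf,
          List.nil_append]
        rw [← ihr]
        simp [List.append_assoc]
    · have hne := pvSplit1_ne_nil r
      cases hs : pvSplit1 r with
      | nil => exact absurd hs hne
      | cons h t =>
        have ihr := ih k
        rw [hs] at ihr
        simp only [List.headD_cons, List.tail_cons] at ihr
        simp only [pvSplit1, if_neg hc, hs, List.modifyHead_cons, List.headD_cons,
          List.tail_cons, pvPartsOf, List.flatten_cons]
        rw [← ihr]
        simp

-- ===== VERDICT (by name: the statement is the Claim_ definition above) =====
theorem bind_qmark_params_py_spec : Claim_equal_bind_qmark_params_py := by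
  intro sql params _ _
  unfold Spec_bind_qmark_params_py bind_qmark_params_py bind_qmark_params_py_alt
  simp only [pvSplitOn_eq, pvJoin_eq_flatten]
  rw [pvFoldA params sql.toList [] PySem.Dict.empty 0]
  simp only [List.nil_append]
  have hn : (PySem.List.len (pvSplit1 sql.toList) - 1 : Int) = (sql.toList.count '?' : Int) := by
    rw [PySem.List.len_eq, pvSplit1_length]
    push_cast
    ring
  have hz : (0 : Int) + (sql.toList.count '?' : Int) = (sql.toList.count '?' : Int) := by ring
  rw [hn, hz, pvB_str sql.toList 0]
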